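-- pv_equiv track=rewrite | github.com/orions-stardom/aoc-2020 | day 16/part_b_naive.py | parse_my_ticket
-- ===== SOURCE A (Python) =====
-- import itertools as it
--
-- def parse_my_ticket(rules, mine, nearby):
--     valid = [ticket for ticket in nearby if
--              all(any(val in r for r in it.chain.from_iterable(rules.values())) for val in ticket)]
--
--     for candidate_field_map in it.permutations(rules):
--         if all(ticket[i] in rules[fname][0] or ticket[i] in rules[fname][1]
--                for ticket in valid
--                for i, fname in enumerate(candidate_field_map)):
--
--             field_map = candidate_field_map
--             break
--
--     else:
--         assert False, 'no possible orderings work'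
--
--     return {fname: mine[i] for i, fname in enumerate(field_map)}
-- ===== SOURCE B (Python) =====
-- def parse_my_ticket(rules, mine, nearby):
--     allowed = set()
--     for a, b in rules.values():
--         allowed.update(a)
--         allowed.update(b)
--     valid = [t for t in nearby if all(v in allowed for v in t)]
--
--     names = list(rules)
--     n = len(names)
--     # which field names are consistent with column i, over all valid tickets
--     cands = [[f for f in names
--               if all(t[i] in rules[f][0] or t[i] in rules[f][1] for t in valid)]
--              for i in range(n)]
--
--     def search(cands_rest, remaining):
--         if not cands_rest:
--             return []
--         c = cands_rest[0]
--         for f in remaining: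
--             if f in c:
--                 rest = search(cands_rest[1:], [g for g in remaining if g != f])
--                 if rest is not None:
--                     return [f] + rest
--         return None
--
--     order = search(cands, names)
--     return dict(zip(order, mine))
-- ===== Notes on version B (the rewrite author's own statement) =====
-- stated objective: alternative
-- what changed: A tests every one of the n! field-name permutations in order against all valid tickets; B precomputes, per ticket column, the list of field names consistent with that column and then runs a depth-first search with pruning that tries fields in the same lexicographic order, returning the same first consistent assignment; the permutation scan disappears, but on weakly-constrained inputs A's first permutation already succeeds, so B is not measurably faster there.
import Mathlib
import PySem

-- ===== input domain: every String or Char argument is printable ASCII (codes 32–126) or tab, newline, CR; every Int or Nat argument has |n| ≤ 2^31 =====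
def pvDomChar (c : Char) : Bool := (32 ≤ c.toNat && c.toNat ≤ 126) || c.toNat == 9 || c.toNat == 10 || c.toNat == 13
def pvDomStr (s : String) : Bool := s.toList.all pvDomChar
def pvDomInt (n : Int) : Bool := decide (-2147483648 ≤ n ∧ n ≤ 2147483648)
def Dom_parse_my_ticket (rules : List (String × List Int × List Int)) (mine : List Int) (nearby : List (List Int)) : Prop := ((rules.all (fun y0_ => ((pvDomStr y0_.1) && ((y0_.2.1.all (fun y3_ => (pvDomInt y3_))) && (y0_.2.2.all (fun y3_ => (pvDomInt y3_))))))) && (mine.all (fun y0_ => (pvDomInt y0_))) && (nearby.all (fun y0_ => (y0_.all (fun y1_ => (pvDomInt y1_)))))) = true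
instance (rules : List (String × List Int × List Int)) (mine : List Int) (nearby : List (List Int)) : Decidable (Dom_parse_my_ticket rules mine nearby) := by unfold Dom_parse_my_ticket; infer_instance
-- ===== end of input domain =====

-- B replaces A's scan over all n! field-name permutations by per-column candidate
-- lists plus a pruned depth-first search trying fields in the same lexicographic
-- order, so it returns A's exact result (objective: alternative).



-- ===== PORT A =====
-- Transliteration of A: filter valid tickets, scan itertools.permutations(rules) for the
-- first consistent field order, build {fname: mine[i]}.  Where Python raises (IndexError
-- on a short ticket / short `mine`, the failing assert) the port returns a stand-in
-- (`false` / `0` / `[]`); Pre_ excludes exactly those inputs.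
def parse_my_ticket (rules : List (String × List Int × List Int)) (mine : List Int) (nearby : List (List Int)) : List (String × Int) :=
  let chainLists := rules.flatMap (fun r => [r.2.1, r.2.2])
  let valid := nearby.filter (fun t => t.all (fun v => chainLists.any (fun r => r.contains v)))
  let lookup := fun f => ((rules.find? (fun r => r.1 == f)).map Prod.snd).getD ([], [])
  match (PySem.List.permutations (rules.map Prod.fst) (rules.map Prod.fst).length).find?
      (fun p => valid.all (fun t => (PySem.List.enumerate p 0).all (fun q =>
        match PySem.List.pyGet? t q.1 with
        | some v => (lookup q.2).1.contains v || (lookup q.2).2.contains v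
        | none => false))) with
  | some p => (PySem.Dict.ofList ((PySem.List.enumerate p 0).map
      (fun q => (q.2, PySem.List.pyGetD mine q.1 0)))).items
  | none => []

-- ===== PORT B =====
def pvSearch : List (List String) → List String → Option (List String)
  | [], _ => some []
  | c :: cs, remaining =>
      remaining.findSome? (fun f =>
        if c.contains f then
          (pvSearch cs (remaining.filter (fun g => g != f))).map (fun rest => f :: rest)
        else none)

-- B-side helper: the pruned depth-first search (Source B's `search`): for the next column try
-- each still-unassigned field in order; on the first candidate whose recursive call
-- succeeds, prepend it.

-- Transliteration of B (Source B): allowed-value set, valid tickets, per-column candidate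
-- field lists, pruned DFS, dict(zip(order, mine)).  Stand-ins for raising spots as in A.
def parse_my_ticket_alt (rules : List (String × List Int × List Int)) (mine : List Int) (nearby : List (List Int)) : List (String × Int) :=
  let allowed : PySem.Set Int := PySem.Set.ofList (rules.flatMap (fun r => r.2.1 ++ r.2.2))
  let valid := nearby.filter (fun t => t.all (fun v => allowed.contains v))
  let names := rules.map Prod.fst
  let lookup := fun f => ((rules.find? (fun r => r.1 == f)).map Prod.snd).getD ([], [])
  let cands := (List.range names.length).map (fun i => names.filter (fun f =>
      valid.all (fun t =>
        match PySem.List.pyGet? t ((i : Nat) : Int) with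
        | some v => (lookup f).1.contains v || (lookup f).2.contains v
        | none => false)))
  match pvSearch cands names with
  | some order => (PySem.Dict.ofList (order.zip mine)).items
  | none => []

-- ===== PRECONDITION & SPEC =====
-- Pre_-side helpers (independent of both ports)
def pvPreRule (rules : List (String × List Int × List Int)) (f : String) : List Int × List Int :=
  ((rules.find? (fun r => r.1 == f)).map Prod.snd).getD ([], [])
def pvPreValid (rules : List (String × List Int × List Int)) (t : List Int) : Bool :=
  t.all (fun v => rules.any (fun r => r.2.1.contains v || r.2.2.contains v))
def pvPreOk (rules : List (String × List Int × List Int)) (nearby : List (List Int)) (f : String) (k : Nat) : Bool :=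
  nearby.all (fun t => !pvPreValid rules t ||
    ((pvPreRule rules f).1.contains (t.getD k 0) || (pvPreRule rules f).2.contains (t.getD k 0)))
-- Pre_ excludes exactly the inputs on which the Python A raises — an IndexError (a valid
-- nearby ticket, or `mine`, with fewer fields than there are rules) or the AssertionError
-- (no consistent assignment of fields to columns exists) — plus duplicate rule names,
-- which a Python caller cannot supply at all since `rules` is a dict.
def Pre_parse_my_ticket (rules : List (String × List Int × List Int)) (mine : List Int) (nearby : List (List Int)) : Prop :=
  (rules.map Prod.fst).Nodup ∧
  rules.length ≤ mine.length ∧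
  (∀ t ∈ nearby, pvPreValid rules t = true → rules.length ≤ t.length) ∧
  ∃ p ∈ (rules.map Prod.fst).permutations, ∀ q ∈ p.zipIdx, pvPreOk rules nearby q.1 q.2 = true
instance (rules : List (String × List Int × List Int)) (mine : List Int) (nearby : List (List Int)) : Decidable (Pre_parse_my_ticket rules mine nearby) := by unfold Pre_parse_my_ticket; infer_instance
def pvWitness_parse_my_ticket : (List (String × List Int × List Int)) × List Int × List (List Int) :=
  ([("row", ([1, 2], [5, 6])), ("seat", ([3], [7]))], [5, 3], [[2, 7], [6, 3]])
def Spec_parse_my_ticket (rules : List (String × List Int × List Int)) (mine : List Int) (nearby : List (List Int)) (out : List (String × Int)) : Prop := out = parse_my_ticket_alt rules mine nearby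
instance (rules : List (String × List Int × List Int)) (mine : List Int) (nearby : List (List Int)) (out : List (String × Int)) : Decidable (Spec_parse_my_ticket rules mine nearby out) := by unfold Spec_parse_my_ticket; infer_instance

-- ===== CLAIM (what is proved, stated in full; the proofs are below) =====
def Claim_equal_parse_my_ticket : Prop := ∀ (rules : List (String × List Int × List Int)) (mine : List Int) (nearby : List (List Int)), Dom_parse_my_ticket rules mine nearby → Pre_parse_my_ticket rules mine nearby → Spec_parse_my_ticket rules mine nearby (parse_my_ticket rules mine nearby)


-- ===== LEMMAS AND PROOFS =====

theorem pv_find?_congr {α : Type} (p q : α → Bool) (l : List α)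
    (h : ∀ x ∈ l, p x = q x) : l.find? p = l.find? q := by
  induction l with
  | nil => rfl
  | cons a as ih =>
    simp only [List.find?_cons, h a (List.mem_cons_self)]
    cases q a
    · exact ih (fun x hx => h x (List.mem_cons_of_mem _ hx))
    · rfl

theorem pv_findSome?_congr {α β : Type} (p q : α → Option β) (l : List α)
    (h : ∀ x ∈ l, p x = q x) : l.findSome? p = l.findSome? q := by
  induction l with
  | nil => rfl
  | cons a as ih =>
    simp only [List.findSome?_cons, h a (List.mem_cons_self)]
    cases q a
    · exact ih (fun x hx => h x (List.mem_cons_of_mem _ hx))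
    · rfl

theorem pv_find?_flatMap {α β : Type} (p : β → Bool) (f : α → List β) (l : List α) :
    (l.flatMap f).find? p = l.findSome? (fun x => (f x).find? p) := by
  induction l with
  | nil => rfl
  | cons a as ih =>
    simp only [List.flatMap_cons, List.find?_append, List.findSome?_cons, ih]
    cases (f a).find? p <;> rfl

theorem pv_findSome?_range {α β : Type} (g : α → Option β) (l : List α) :
    l.findSome? g =
      (List.range l.length).findSome? (fun i =>
        match l[i]? with
        | none => none
        | some x => g x) := by
  induction l with
  | nil => rfl
  | cons a as ih =>
    rw [List.length_cons, List.range_succ_eq_map]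
    simp only [List.findSome?_cons, List.findSome?_map, List.getElem?_cons_zero,
      Function.comp_def, Nat.succ_eq_add_one, List.getElem?_cons_succ]
    cases h : g a
    · exact ih
    · rfl


theorem pv_search_eq : ∀ (cl : List (List String)) (r : List String),
    r.Nodup → r.length = cl.length →
    pvSearch cl r = (PySem.List.permutations r r.length).find?
      (fun p => (p.zip cl).all (fun q => q.2.contains q.1)) := by
  intro cl
  induction cl with
  | nil =>
    intro r _ hlen
    simp only [List.length_nil] at hlen
    rw [List.length_eq_zero_iff] at hlen
    subst hlen
    rfl
  | cons c cs ih =>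
    intro r hnd hlen
    rw [hlen, List.length_cons, PySem.List.permutations.eq_def]
    rw [pv_find?_flatMap]
    show pvSearch (c :: cs) r = _
    rw [pvSearch, pv_findSome?_range _ r]
    apply pv_findSome?_congr
    intro i hi
    rw [List.mem_range] at hi
    rw [List.getElem?_eq_getElem hi]
    show _ = ((PySem.List.permutations (r.eraseIdx i) cs.length).map (fun p => r[i] :: p)).find? _
    rw [List.find?_map]
    have hzip : ((fun p => (p.zip (c :: cs)).all (fun q => q.2.contains q.1)) ∘ (fun p => r[i] :: p))
          = (fun p => c.contains r[i] && (p.zip cs).all (fun q => q.2.contains q.1)) := by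
      funext p; rfl
    have hred : (match some r[i] with
        | none => none
        | some x => if c.contains x = true then
            Option.map (fun rest => x :: rest) (pvSearch cs (List.filter (fun g => g != x) r))
          else none)
        = (if c.contains r[i] = true then
            Option.map (fun rest => r[i] :: rest) (pvSearch cs (List.filter (fun g => g != r[i]) r))
          else none) := rfl
    refine Eq.trans hred ?_
    by_cases hc : c.contains r[i] = true
    · rw [if_pos hc]
      simp only [hzip, hc, Bool.true_and]
      have hfilter : r.filter (fun g => g != r[i]) = r.eraseIdx i := by
        rw [← List.Nodup.erase_eq_filter hnd, List.Nodup.erase_getElem hnd i hi]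
      rw [hfilter]
      have hlen' : (r.eraseIdx i).length = cs.length := by
        rw [List.length_eraseIdx, if_pos hi, hlen]
        simp
      rw [ih (r.eraseIdx i) (List.Nodup.eraseIdx i hnd) hlen', hlen']
    · rw [Bool.not_eq_true] at hc
      rw [if_neg (by rw [hc]; simp)]
      simp only [hzip, hc, Bool.false_and]
      simp

theorem pv_pred_eq (chk : List Int → Int → String → Bool) (valid : List (List Int))
    (names : List String) (p : List String) (hp : p.Perm names) :
    (valid.all (fun t => (PySem.List.enumerate p 0).all (fun q => chk t q.1 q.2)))
      = ((p.zip ((List.range names.length).map (fun (i : Nat) =>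
            names.filter (fun f => valid.all (fun t => chk t (↑i) f))))).all
          (fun q => q.2.contains q.1)) := by
  have hplen := hp.length_eq
  rw [Bool.eq_iff_iff]
  simp only [List.all_eq_true]
  constructor
  · intro h q hq
    obtain ⟨k, hk, hq⟩ := List.mem_iff_getElem.mp hq
    subst hq
    have hk' : k < p.length := by
      simp only [List.length_zip, List.length_map, List.length_range] at hk
      omega
    rw [List.getElem_zip]
    show (((List.range names.length).map (fun i =>
        names.filter (fun f => valid.all (fun t => chk t ((i : Nat) : Int) f))))[k]'(by
          simp only [List.length_zip, List.length_map, List.length_range] at hk ⊢; omega)).contains p[k] = true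
    rw [List.getElem_map, List.getElem_range, List.contains_iff_mem, List.mem_filter]
    refine ⟨hp.subset (List.getElem_mem hk'), ?_⟩
    rw [List.all_eq_true]
    intro t ht
    have := h t ht ((k : Int), p[k]) (by
      rw [PySem.List.mem_enumerate_iff]
      exact ⟨k, hk', by simp⟩)
    exact this
  · intro h t ht q hq
    rw [PySem.List.mem_enumerate_iff] at hq
    obtain ⟨k, hk, hq⟩ := hq
    subst hq
    have hkz : k < (p.zip ((List.range names.length).map (fun i =>
        names.filter (fun f => valid.all (fun t => chk t ((i : Nat) : Int) f))))).length := by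
      simp only [List.length_zip, List.length_map, List.length_range]
      omega
    have h2 := h _ (List.getElem_mem hkz)
    rw [List.getElem_zip, List.getElem_map, List.getElem_range] at h2
    simp only [List.contains_iff_mem, List.mem_filter, List.all_eq_true] at h2
    have h3 := h2.2 t ht
    simpa using h3

theorem pv_enumMap_eq_zip (p : List String) (mine : List Int) (h : p.length ≤ mine.length) :
    (PySem.List.enumerate p 0).map (fun q => (q.2, PySem.List.pyGetD mine q.1 0)) = p.zip mine := by
  apply List.ext_getElem
  · simp only [List.length_map, PySem.List.length_enumerate, List.length_zip]
    omega
  · intro k h1 h2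
    simp only [List.length_map, PySem.List.length_enumerate] at h1
    simp only [List.getElem_map, PySem.List.getElem_enumerate, List.getElem_zip, zero_add,
      PySem.List.pyGetD_natCast]
    rw [List.getD_eq_getElem]

-- ===== VERDICT (by name: the statement is the Claim_ definition above) =====
theorem parse_my_ticket_spec : Claim_equal_parse_my_ticket := by
  intro rules mine nearby _ hPre
  obtain ⟨hnd, hmine, hlenT, -⟩ := hPre
  unfold Spec_parse_my_ticket
  simp only [parse_my_ticket, parse_my_ticket_alt]
  have hvalid : nearby.filter (fun t => t.all (fun v =>
        PySem.Set.contains (PySem.Set.ofList (rules.flatMap (fun r => r.2.1 ++ r.2.2))) v))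
      = nearby.filter (fun t => t.all (fun v =>
        (rules.flatMap (fun r => [r.2.1, r.2.2])).any (fun r => r.contains v))) := by
    apply List.filter_congr
    intro t _
    rw [Bool.eq_iff_iff]
    simp only [List.all_eq_true]
    constructor <;> intro h v hv <;> have h2 := h v hv
    · simp only [PySem.Set.contains, List.contains_iff_mem, PySem.Set.mem_ofList,
        List.mem_flatMap] at h2
      obtain ⟨r, hr, hvr⟩ := h2
      rw [List.mem_append] at hvr
      simp only [List.any_eq_true]
      refine ⟨if v ∈ r.2.1 then r.2.1 else r.2.2, ?_, ?_⟩
      · simp only [List.mem_flatMap]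
        exact ⟨r, hr, by split <;> simp⟩
      · rw [List.contains_iff_mem]
        split
        · assumption
        · tauto
    · simp only [List.any_eq_true, List.mem_flatMap] at h2
      obtain ⟨lst, ⟨r, hr, hlst⟩, hvl⟩ := h2
      simp only [PySem.Set.contains, List.contains_iff_mem, PySem.Set.mem_ofList,
        List.mem_flatMap]
      refine ⟨r, hr, ?_⟩
      rw [List.mem_append]
      rw [List.contains_iff_mem] at hvl
      simp only [List.mem_cons] at hlst
      rcases hlst with h1 | h1 | h1
      · left; rw [← h1]; exact hvl
      · right; rw [← h1]; exact hvl
      · cases h1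
  rw [hvalid]
  set v := nearby.filter (fun t => t.all (fun v =>
      (rules.flatMap (fun r => [r.2.1, r.2.2])).any (fun r => r.contains v))) with hv
  have hfind : (List.find?
        (fun p =>
          v.all fun t =>
            (PySem.List.enumerate p).all fun q =>
              match PySem.List.pyGet? t q.1 with
              | some v =>
                ((Option.map Prod.snd (List.find? (fun r => r.1 == q.2) rules)).getD ([], [])).1.contains v ||
                  ((Option.map Prod.snd (List.find? (fun r => r.1 == q.2) rules)).getD ([], [])).2.contains v
              | none => false)
        (PySem.List.permutations (List.map Prod.fst rules) (List.map Prod.fst rules).length))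
      = pvSearch ((List.range (List.map Prod.fst rules).length).map
          (fun (i : Nat) =>
            List.filter
              (fun f =>
                v.all fun t =>
                  match PySem.List.pyGet? t (↑i) with
                  | some v =>
                    ((Option.map Prod.snd (List.find? (fun r => r.1 == f) rules)).getD ([], [])).1.contains v ||
                      ((Option.map Prod.snd (List.find? (fun r => r.1 == f) rules)).getD ([], [])).2.contains v
                  | none => false)
              (List.map Prod.fst rules))) (List.map Prod.fst rules) := by
    rw [pv_search_eq _ _ hnd (by simp)]
    exact pv_find?_congr _ _ _ (fun p hp =>
      pv_pred_eq (fun t i f =>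
        match PySem.List.pyGet? t i with
        | some w =>
          ((Option.map Prod.snd (List.find? (fun r => r.1 == f) rules)).getD ([], [])).1.contains w ||
            ((Option.map Prod.snd (List.find? (fun r => r.1 == f) rules)).getD ([], [])).2.contains w
        | none => false) v (List.map Prod.fst rules) p (PySem.List.perm_of_mem_permutations hp))
  rw [hfind]
  rcases hcase : pvSearch ((List.range (List.map Prod.fst rules).length).map
          (fun (i : Nat) =>
            List.filter
              (fun f =>
                v.all fun t =>
                  match PySem.List.pyGet? t (↑i) with
                  | some v =>
                    ((Option.map Prod.snd (List.find? (fun r => r.1 == f) rules)).getD ([], [])).1.contains v ||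
                      ((Option.map Prod.snd (List.find? (fun r => r.1 == f) rules)).getD ([], [])).2.contains v
                  | none => false)
              (List.map Prod.fst rules))) (List.map Prod.fst rules) with _ | p
  · rfl
  · have hpm : p.Perm (List.map Prod.fst rules) := by
      rw [pv_search_eq _ _ hnd (by simp)] at hcase
      exact PySem.List.perm_of_mem_permutations (List.mem_of_find?_eq_some hcase)
    have hlenp : p.length ≤ mine.length := by
      rw [hpm.length_eq, List.length_map]
      exact hmine
    simp only [pv_enumMap_eq_zip p mine hlenp]
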